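-- pv_equiv track=rewrite | github.com/rpunit/python-programs | amazon/wordTransform.py | recurse
-- ===== SOURCE A (Python) =====
-- def recurse(w1,w2,index) :
--
-- 	if index == len(w1)  :
-- 		return [""]
--
-- 	prev = recurse(w1,w2, index +1)
-- 	out = []
-- 	for p in prev :
-- 		out.append(w1[index] + p)
-- 		out.append(w2[index] + p)
--
-- 	return out
-- ===== SOURCE B (Python) =====
-- def recurse(w1, w2, index):
--     result = [""]
--     for i in range(len(w1) - 1, index - 1, -1):
--         result = [c + p for p in result for c in (w1[i], w2[i])]
--     return result
-- ===== Notes on version B (the rewrite author's own statement) =====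
-- stated objective: alternative
-- what changed: Replaces the recursion (which descends to the end of w1 before building the output on the way back) by an explicit loop that iterates i from len(w1)-1 down to index, rebuilding the suffix list in place with a comprehension.
import Mathlib
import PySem

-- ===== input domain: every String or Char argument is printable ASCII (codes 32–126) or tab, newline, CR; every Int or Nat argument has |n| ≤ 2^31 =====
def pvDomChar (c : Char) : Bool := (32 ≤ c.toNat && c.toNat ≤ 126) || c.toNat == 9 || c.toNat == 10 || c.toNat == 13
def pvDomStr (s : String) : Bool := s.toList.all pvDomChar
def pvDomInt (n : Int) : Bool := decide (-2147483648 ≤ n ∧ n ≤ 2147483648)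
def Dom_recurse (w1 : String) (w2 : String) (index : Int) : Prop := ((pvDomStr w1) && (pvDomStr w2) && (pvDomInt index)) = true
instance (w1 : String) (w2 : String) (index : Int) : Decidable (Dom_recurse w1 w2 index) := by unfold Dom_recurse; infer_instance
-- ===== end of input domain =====

-- B replaces A's recursion by an explicit countdown loop over range(len(w1)-1, index-1, -1); equal return values on Pre_ (no speed claim).

-- one-character string s[i] with Python's negative indexing; "" only out of range (excluded by Pre_)
def pvCharAt (s : String) (i : Int) : String :=
  ((PySem.Str.pyGet? s i).map (fun c => String.ofList [c])).getD ""

-- ===== PORT A =====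
-- literal port of A; the 'else if len < index' branch returns a junk value where the Python
-- recursion never terminates (RecursionError) — excluded by Pre_, needed only for totality
def recurse (w1 : String) (w2 : String) (index : Int) : List String :=
  if index = (PySem.Str.len w1) then [""]
  else if (PySem.Str.len w1) < index then []
  else
    let prev := recurse w1 w2 (index + 1)
    prev.foldl (fun out p => (out ++ [pvCharAt w1 index ++ p]) ++ [pvCharAt w2 index ++ p]) []
termination_by ((PySem.Str.len w1) - index).toNat
decreasing_by simp [PySem.Str.len] at *; omega

-- ===== PORT B =====
def recurse_alt (w1 : String) (w2 : String) (index : Int) : List String :=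
  (PySem.List.pyRange ((PySem.Str.len w1) - 1) (index - 1) (-1)).foldl
    (fun result i => result.flatMap (fun p => [pvCharAt w1 i ++ p, pvCharAt w2 i ++ p]))
    [""]

-- ===== PRECONDITION & SPEC =====
-- Pre_ excludes exactly the inputs where Python A raises: index > len(w1) (unbounded recursion,
-- RecursionError) and, unless index = len(w1), any character access w1[j]/w2[j], index ≤ j < len(w1),
-- that is out of range (IndexError): that needs index ≥ -len(w1) and len(w2) ≥ len(w1).
def Pre_recurse (w1 : String) (w2 : String) (index : Int) : Prop :=
  index = (PySem.Str.len w1) ∨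
    (-(PySem.Str.len w1) ≤ index ∧ index ≤ (PySem.Str.len w1) ∧ (PySem.Str.len w1) ≤ (PySem.Str.len w2))
instance (w1 : String) (w2 : String) (index : Int) : Decidable (Pre_recurse w1 w2 index) := by
  unfold Pre_recurse; infer_instance
def pvWitness_recurse : String × String × Int := ("ab", "cd", 0)

def Spec_recurse (w1 : String) (w2 : String) (index : Int) (out : List String) : Prop := out = recurse_alt w1 w2 index
instance (w1 : String) (w2 : String) (index : Int) (out : List String) : Decidable (Spec_recurse w1 w2 index out) := by unfold Spec_recurse; infer_instance

-- ===== CLAIM (what is proved, stated in full; the proofs are below) =====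
def Claim_equal_recurse : Prop := ∀ (w1 : String) (w2 : String) (index : Int), Dom_recurse w1 w2 index → Pre_recurse w1 w2 index → Spec_recurse w1 w2 index (recurse w1 w2 index)

-- ===== LEMMAS AND PROOFS =====

-- the descending loop range gains its last element 'index' when index ≤ len-1
lemma pyRange_neg_one_snoc (a b : Int) (h : b ≤ a) :
    PySem.List.pyRange a (b - 1) (-1) = PySem.List.pyRange a b (-1) ++ [b] := by
  rw [PySem.List.pyRange_neg_one, PySem.List.pyRange_neg_one]
  have h1 : (a - (b - 1)).toNat = (a - b).toNat + 1 := by omega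
  rw [h1, List.range_succ, List.map_append]
  simp
  omega

-- A's fold body (two appends) is the flatMap of a two-element list
lemma recurse_body_flatMap (w1 w2 : String) (index : Int) (prev : List String) :
    prev.foldl (fun out p => (out ++ [pvCharAt w1 index ++ p]) ++ [pvCharAt w2 index ++ p]) []
      = prev.flatMap (fun p => [pvCharAt w1 index ++ p, pvCharAt w2 index ++ p]) := by
  have : ∀ (acc : List String),
      prev.foldl (fun out p => (out ++ [pvCharAt w1 index ++ p]) ++ [pvCharAt w2 index ++ p]) acc
        = acc ++ prev.flatMap (fun p => [pvCharAt w1 index ++ p, pvCharAt w2 index ++ p]) := by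
    induction prev with
    | nil => simp [List.foldl]
    | cons q qs _ => intro acc; simp [List.foldl, List.flatMap]
  simpa using this []

-- main invariant: for index ≤ len(w1), A's recursion equals B's countdown loop
lemma recurse_eq_alt (w1 w2 : String) (index : Int) (h : index ≤ (PySem.Str.len w1)) :
    recurse w1 w2 index = recurse_alt w1 w2 index := by
  have hk : ∃ k : Nat, ((PySem.Str.len w1) - index).toNat = k := ⟨_, rfl⟩
  obtain ⟨k, hk⟩ := hk
  induction k generalizing index with
  | zero =>
    have hi : index = (PySem.Str.len w1) := by omega
    rw [recurse, recurse_alt, if_pos hi, hi]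
    rw [PySem.List.pyRange_neg_one_eq_nil (by omega)]
    simp
  | succ k ih =>
    have hlt : index < (PySem.Str.len w1) := by omega
    rw [recurse, if_neg (by omega), if_neg (by omega)]
    rw [recurse_alt]
    rw [show index - 1 = (index + 1) - 1 - 1 by ring, pyRange_neg_one_snoc _ _ (by omega),
        show (index + 1) - 1 = index by ring]
    rw [List.foldl_append]
    have hrec : recurse w1 w2 (index + 1) = recurse_alt w1 w2 (index + 1) :=
      ih (index + 1) (by omega) (by omega)
    simp only [recurse_body_flatMap, hrec, recurse_alt, List.foldl_cons, List.foldl_nil, Int.add_sub_cancel]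

-- ===== VERDICT (by name: the statement is the Claim_ definition above) =====
theorem recurse_spec : Claim_equal_recurse := by
  intro w1 w2 index _ hpre
  unfold Spec_recurse
  apply recurse_eq_alt
  rcases hpre with h | ⟨_, h, _⟩ <;> omega
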